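-- pv_equiv track=rewrite | github.com/ValdezFOmar/advent-of-code-2023 | utils/iterutils.py | divide_by
-- ===== SOURCE A (Python) =====
-- from typing import Iterable, Iterator, Sequence, TypeVar
--
-- T = TypeVar("T")
--
-- def divide_by(value: object, iterable: Iterable[T]) -> Iterator[tuple[T, ...]]:
--     """Divide iterable into subsequences at the given value."""
--     values: list[T] = []
--
--     for item in iterable:
--         if item != value:
--             values.append(item)
--         else:
--             yield tuple(values)
--             values = []
--     yield tuple(values)
-- ===== SOURCE B (Python) =====
-- from typing import Iterable, Iterator, TypeVar
--
-- T = TypeVar("T")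
--
-- def divide_by(value: object, iterable: Iterable[T]) -> Iterator[tuple[T, ...]]:
--     """Divide iterable into subsequences at the given value."""
--     items = list(iterable)
--     while True:
--         try:
--             i = items.index(value)
--         except ValueError:
--             yield tuple(items)
--             return
--         yield tuple(items[:i])
--         items = items[i + 1:]
-- ===== Notes on version B (the rewrite author's own statement) =====
-- stated objective: alternative
-- what changed: B repeatedly locates the next separator with list.index and emits whole slices between separators, instead of A's element-by-element accumulation in a generator loop.
import Mathlib
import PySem

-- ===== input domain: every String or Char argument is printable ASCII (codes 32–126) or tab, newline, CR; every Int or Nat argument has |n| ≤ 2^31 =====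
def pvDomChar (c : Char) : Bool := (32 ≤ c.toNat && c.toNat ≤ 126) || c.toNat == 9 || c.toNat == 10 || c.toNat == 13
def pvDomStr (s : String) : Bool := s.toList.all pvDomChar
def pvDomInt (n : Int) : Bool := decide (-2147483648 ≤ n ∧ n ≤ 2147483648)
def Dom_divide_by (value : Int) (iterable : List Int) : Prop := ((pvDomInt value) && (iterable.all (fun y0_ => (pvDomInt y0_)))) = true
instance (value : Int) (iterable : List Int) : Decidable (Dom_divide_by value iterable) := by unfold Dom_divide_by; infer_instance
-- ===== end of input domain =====

-- B is an alternative decomposition (find the next separator with list.index, emit slices); same O(n) cost as A, return value proved equal.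

-- ===== PORT A =====
-- A: one pass accumulating `values`, flushing it at each separator, plus a final flush.
def divide_by (value : Int) (iterable : List Int) : List (List Int) :=
  let s := iterable.foldl
    (fun (s : List (List Int) × List Int) item =>
      if item ≠ value then (s.1, s.2 ++ [item]) else (s.1 ++ [s.2], []))
    ([], [])
  s.1 ++ [s.2]

-- ===== PORT B =====
-- B: repeatedly items.index(value); emit items[:i], continue on items[i+1:]; when no separator, emit the rest.
def divide_by_alt (value : Int) (items : List Int) : List (List Int) :=
  match h : PySem.List.index? items value with
  | none => [items]
  | some i =>
      PySem.List.slice items none (some (i : Int)) ::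
        divide_by_alt value (PySem.List.slice items (some ((i : Int) + 1)) none)
termination_by items.length
decreasing_by
  obtain ⟨hk, -, -⟩ := PySem.List.getElem_of_index?_eq_some h
  rw [PySem.List.slice_from items (by positivity)]
  simp only [List.length_drop]
  omega

-- ===== PRECONDITION & SPEC =====
def Spec_divide_by (value : Int) (iterable : List Int) (out : List (List Int)) : Prop := out = divide_by_alt value iterable
instance (value : Int) (iterable : List Int) (out : List (List Int)) : Decidable (Spec_divide_by value iterable out) := by unfold Spec_divide_by; infer_instance

-- ===== CLAIM (what is proved, stated in full; the proofs are below) =====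
def Claim_equal_divide_by : Prop := ∀ (value : Int) (iterable : List Int), Dom_divide_by value iterable → Spec_divide_by value iterable (divide_by value iterable)

-- ===== LEMMAS AND PROOFS =====

-- reference recursion both ports are reduced to
def splitAux (value : Int) (acc : List Int) : List Int → List (List Int)
  | [] => [acc]
  | x :: xs => if x ≠ value then splitAux value (acc ++ [x]) xs else acc :: splitAux value [] xs

theorem divide_by_eq_splitAux (value : Int) (xs : List Int) (out : List (List Int)) (vals : List Int) :
    (xs.foldl
      (fun (s : List (List Int) × List Int) item =>
        if item ≠ value then (s.1, s.2 ++ [item]) else (s.1 ++ [s.2], []))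
      (out, vals)).1 ++
    [(xs.foldl
      (fun (s : List (List Int) × List Int) item =>
        if item ≠ value then (s.1, s.2 ++ [item]) else (s.1 ++ [s.2], []))
      (out, vals)).2] = out ++ splitAux value vals xs := by
  induction xs generalizing out vals with
  | nil => simp [splitAux]
  | cons x xs ih =>
      by_cases hx : x = value
      · simp only [List.foldl_cons, if_neg (by simp [hx] : ¬ x ≠ value)]
        rw [ih]
        simp [splitAux, hx]
      · simp only [List.foldl_cons, if_pos hx]
        rw [ih]
        simp [splitAux, hx]

theorem splitAux_of_not_mem (value : Int) (acc xs : List Int) (h : value ∉ xs) :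
    splitAux value acc xs = [acc ++ xs] := by
  induction xs generalizing acc with
  | nil => simp [splitAux]
  | cons x xs ih =>
      have hx : x ≠ value := by rintro rfl; exact h (List.mem_cons_self)
      simp only [splitAux, if_pos hx]
      rw [ih _ (fun hm => h (List.mem_cons_of_mem _ hm))]
      simp

theorem splitAux_append_sep (value : Int) (acc pre suf : List Int) (h : value ∉ pre) :
    splitAux value acc (pre ++ value :: suf) = (acc ++ pre) :: splitAux value [] suf := by
  induction pre generalizing acc with
  | nil => simp [splitAux]
  | cons x xs ih =>
      have hx : x ≠ value := by rintro rfl; exact h (List.mem_cons_self)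
      simp only [List.cons_append, splitAux, if_pos hx]
      rw [ih _ (fun hm => h (List.mem_cons_of_mem _ hm))]
      simp

theorem divide_by_alt_eq_splitAux (value : Int) (items : List Int) :
    divide_by_alt value items = splitAux value [] items := by
  induction items using divide_by_alt.induct value with
  | case1 items h =>
      rw [divide_by_alt, h, splitAux_of_not_mem _ _ _ ((PySem.List.index?_eq_none_iff items value).mp h)]
      simp
  | case2 items i h ih =>
      obtain ⟨pre, suf, hsplit, hlen, hnot⟩ := (PySem.List.index?_eq_some_iff items value i).mp h
      have hitems : items = (pre ++ [value]) ++ suf := by simp [hsplit]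
      have h1 : PySem.List.slice items none (some (i : Int)) = pre := by
        rw [PySem.List.slice_to items (by positivity)]
        rw [hsplit]
        have hi : ((i : Int)).toNat = pre.length := by omega
        rw [hi, List.take_left]
      have h2 : PySem.List.slice items (some ((i : Int) + 1)) none = suf := by
        rw [PySem.List.slice_from items (by positivity)]
        rw [hitems]
        have hi : ((i : Int) + 1).toNat = (pre ++ [value]).length := by simp [← hlen]
        rw [hi, List.drop_left]
      rw [divide_by_alt, h]
      show PySem.List.slice items none (some (i : Int)) ::
            divide_by_alt value (PySem.List.slice items (some ((i : Int) + 1))) =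
          splitAux value [] items
      rw [h2] at ih
      rw [h1, h2, hsplit, splitAux_append_sep _ _ _ _ hnot, ih]
      simp

-- ===== VERDICT (by name: the statement is the Claim_ definition above) =====
theorem divide_by_spec : Claim_equal_divide_by := by
  intro value iterable _
  show divide_by value iterable = divide_by_alt value iterable
  rw [divide_by_alt_eq_splitAux]
  exact divide_by_eq_splitAux value iterable [] []
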